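-- pv_equiv track=rewrite | github.com/huggin/gfg | math/game_xor.py | gameOfXor
-- ===== SOURCE A (Python) =====
-- def gameOfXor(N, A):
--     # code here
--     ans = 0
--     for i in range(N):
--         left = i + 1
--         right = N - i
--         if left * right % 2 == 1:
--             ans ^= A[i]
--
--     return ans
-- ===== SOURCE B (Python) =====
-- def gameOfXor(N, A):
--     # (i+1)*(N-i) is odd iff N is odd and i is even: decide parity once, then stride-2.
--     if N % 2 == 0:
--         return 0
--     ans = 0
--     for i in range(0, N, 2):
--         ans ^= A[i]
--     return ans
-- ===== Notes on version B (the rewrite author's own statement) =====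
-- stated objective: simpler
-- what changed: Replaces the per-element (i+1)*(N-i)%2 parity test inside the loop with one upfront N%2 decision: return 0 for even N, otherwise a stride-2 loop XORing the even-indexed elements.
import Mathlib
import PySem

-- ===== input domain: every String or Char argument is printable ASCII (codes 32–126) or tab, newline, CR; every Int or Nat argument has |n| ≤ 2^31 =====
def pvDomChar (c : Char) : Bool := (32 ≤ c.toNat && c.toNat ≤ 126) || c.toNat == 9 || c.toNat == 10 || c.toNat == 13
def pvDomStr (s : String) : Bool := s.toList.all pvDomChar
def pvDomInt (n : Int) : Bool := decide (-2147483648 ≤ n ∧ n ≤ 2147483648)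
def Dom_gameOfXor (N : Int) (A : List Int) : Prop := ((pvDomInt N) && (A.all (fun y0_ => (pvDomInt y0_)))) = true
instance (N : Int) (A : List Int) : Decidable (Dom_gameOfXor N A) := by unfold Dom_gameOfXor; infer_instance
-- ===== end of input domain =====

-- B replaces the per-element (i+1)*(N-i)%2 test with one upfront N%2 decision and a stride-2 loop (simpler).

-- ===== PORT A =====
-- pyGetD with default 0 is exact under Pre_gameOfXor (index always in range there).
def gameOfXor (N : Int) (A : List Int) : Int :=
  (PySem.List.pyRange 0 N 1).foldl (fun ans i =>
    let left := i + 1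
    let right := N - i
    if PySem.Int.mod (left * right) 2 = 1 then PySem.Int.bxor ans (PySem.List.pyGetD A i 0) else ans) 0

-- ===== PORT B =====
def gameOfXor_alt (N : Int) (A : List Int) : Int :=
  if PySem.Int.mod N 2 = 0 then 0
  else (PySem.List.pyRange 0 N 2).foldl (fun ans i => PySem.Int.bxor ans (PySem.List.pyGetD A i 0)) 0

-- ===== PRECONDITION & SPEC =====
-- Pre_ excludes exactly the inputs where Python A raises IndexError: odd N larger than len(A)
-- (for even N no element is ever indexed, so A returns 0 regardless of len(A)).
def Pre_gameOfXor (N : Int) (A : List Int) : Prop := PySem.Int.mod N 2 = 1 → N ≤ A.length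
instance (N : Int) (A : List Int) : Decidable (Pre_gameOfXor N A) := by unfold Pre_gameOfXor; infer_instance
def pvWitness_gameOfXor : Int × List Int := (3, [5, 7, 9])

def Spec_gameOfXor (N : Int) (A : List Int) (out : Int) : Prop := out = gameOfXor_alt N A
instance (N : Int) (A : List Int) (out : Int) : Decidable (Spec_gameOfXor N A out) := by unfold Spec_gameOfXor; infer_instance

-- ===== CLAIM (what is proved, stated in full; the proofs are below) =====
def Claim_equal_gameOfXor : Prop := ∀ (N : Int) (A : List Int), Dom_gameOfXor N A → Pre_gameOfXor N A → Spec_gameOfXor N A (gameOfXor N A)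

-- ===== LEMMAS AND PROOFS =====

-- even indices among 0..n-1, as a stride-2 list
theorem range_filter_even (n : Nat) :
    (List.range n).filter (fun k => k % 2 == 0) = (List.range ((n + 1) / 2)).map (2 * ·) := by
  induction n with
  | zero => simp
  | succ n ih =>
    rw [List.range_succ, List.filter_append, ih]
    rcases Nat.even_or_odd n with h | h
    · obtain ⟨m, rfl⟩ := h
      have h2 : (m + m + 1 + 1) / 2 = (m + m + 1) / 2 + 1 := by omega
      have h3 : (m + m + 1) / 2 = m := by omega
      rw [h2, List.range_succ, List.map_append, h3,
        List.filter_cons_of_pos (by simp only [beq_iff_eq]; omega)]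
      simp
      omega
    · obtain ⟨m, rfl⟩ := h
      have h2 : (2 * m + 1 + 1 + 1) / 2 = (2 * m + 1 + 1) / 2 := by omega
      rw [List.filter_cons_of_neg (by simp only [beq_iff_eq]; omega), h2]
      simp

theorem parity_cond_iff (N i : Int) (hN : PySem.Int.mod N 2 = 1) :
    PySem.Int.mod ((i + 1) * (N - i)) 2 = 1 ↔ PySem.Int.mod i 2 = 0 := by
  rw [PySem.Int.mod_eq_emod_of_pos (by omega)] at hN
  rw [PySem.Int.mod_eq_emod_of_pos (by omega), PySem.Int.mod_eq_emod_of_pos (by omega),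
    Int.mul_emod]
  rcases Int.emod_two_eq i with hi | hi
  · have h1 : (i + 1) % 2 = 1 := by omega
    have h2 : (N - i) % 2 = 1 := by omega
    simp [h1, h2, hi]
  · have h1 : (i + 1) % 2 = 0 := by omega
    simp [h1, hi]

theorem parity_cond_false (N i : Int) (hN : PySem.Int.mod N 2 = 0) :
    ¬ PySem.Int.mod ((i + 1) * (N - i)) 2 = 1 := by
  rw [PySem.Int.mod_eq_emod_of_pos (by omega)] at hN
  rw [PySem.Int.mod_eq_emod_of_pos (by omega), Int.mul_emod]
  rcases Int.emod_two_eq i with hi | hi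
  · have h2 : (N - i) % 2 = 0 := by omega
    simp [h2]
  · have h1 : (i + 1) % 2 = 0 := by omega
    simp [h1]

-- ===== VERDICT (by name: the statement is the Claim_ definition above) =====
theorem gameOfXor_spec : Claim_equal_gameOfXor := by
  intro N A _ _
  show gameOfXor N A = gameOfXor_alt N A
  have hdef : gameOfXor N A = (PySem.List.pyRange 0 N 1).foldl (fun ans i =>
      if PySem.Int.mod ((i + 1) * (N - i)) 2 = 1 then PySem.Int.bxor ans (PySem.List.pyGetD A i 0) else ans) 0 := rfl
  rw [hdef]
  unfold gameOfXor_alt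
  rw [PySem.List.foldl_ite_eq_foldl_filter
    (fun i => PySem.Int.mod ((i + 1) * (N - i)) 2 = 1)
    (fun ans i => PySem.Int.bxor ans (PySem.List.pyGetD A i 0))]
  rcases PySem.Int.mod_two_eq N with hN | hN
  · -- N even: A's guard is never true, so nothing survives the filter
    rw [if_pos hN]
    have hnil : (PySem.List.pyRange 0 N 1).filter
        (fun i => decide (PySem.Int.mod ((i + 1) * (N - i)) 2 = 1)) = [] := by
      apply List.filter_eq_nil_iff.mpr
      intro x _
      simp only [decide_eq_true_eq]
      exact parity_cond_false N x hN
    rw [hnil]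
    rfl
  · rw [if_neg (by omega)]
    congr 1
    -- the filtered range is exactly the stride-2 range
    by_cases hpos : 0 < N
    · rw [PySem.List.pyRange_one, PySem.List.pyRange_of_pos 0 N (by omega)]
      rw [List.filter_map]
      have hc : ∀ k ∈ List.range (N - 0).toNat,
          ((fun i => decide (PySem.Int.mod ((i + 1) * (N - i)) 2 = 1)) ∘ (fun k : Nat => (0:Int) + k)) k
          = (fun k : Nat => k % 2 == 0) k := by
        intro k _
        simp only [Function.comp, Int.zero_add]
        have h2 : ((k:Int) + 1) * (N - (k:Int)) % 2 = 1 ↔ k % 2 = 0 := by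
          rw [← PySem.Int.mod_eq_emod_of_pos (b := 2) (by omega),
            parity_cond_iff N k hN, PySem.Int.mod_eq_emod_of_pos (by omega)]
          omega
        by_cases hk : k % 2 = 0 <;> simp [h2, hk]
      rw [List.filter_congr hc, range_filter_even]
      have hn : ((N - 0 + 2 - 1) / 2).toNat = ((N - 0).toNat + 1) / 2 := by omega
      rw [if_pos (by omega : (0:Int) < N), hn, List.map_map]
      apply List.map_congr_left
      intro k _
      simp
    · rw [PySem.List.pyRange_one, PySem.List.pyRange_of_pos 0 N (by omega)]
      have h0 : (N - 0).toNat = 0 := by omega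
      simp [if_neg (by omega : ¬ (0:Int) < N)]
      intro a ha
      omega
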